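-- pv_equiv track=rewrite | github.com/nomindnick/style-manual-experiments | rules/01-two-spaces/rule.py | _is_three_dot_ellipsis
-- ===== SOURCE A (Python) =====
-- def _is_three_dot_ellipsis(text: str, period_pos: int) -> bool:
--     """True iff `period_pos` lies in a run of exactly three consecutive dots.
--
--     LS-SP-03 treats `...` as a mid-sentence ellipsis (not a terminator) and
--     `....` as end-of-sentence (a terminator). Only the three-dot case is
--     suppressed here.
--     """
--     if text[period_pos] != ".":
--         return False
--     start = period_pos
--     while start > 0 and text[start - 1] == ".":
--         start -= 1
--     end = period_pos + 1
--     while end < len(text) and text[end] == ".":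
--         end += 1
--     return (end - start) == 3
-- ===== SOURCE B (Python) =====
-- def _is_three_dot_ellipsis(text: str, period_pos: int) -> bool:
--     """Window version: the position is in a run of exactly three dots iff one of the
--     three 3-dot windows covering it fits in the text with non-dot (or absent) flanks."""
--     if text[period_pos] != '.':
--         return False
--     n = len(text)
--     for offset in (0, 1, 2):
--         start = period_pos - offset
--         if start < 0 or start + 2 >= n:
--             continue
--         if text[start] == '.' and text[start + 1] == '.' and text[start + 2] == '.':
--             if (start - 1 < 0 or text[start - 1] != '.') and (start + 3 >= n or text[start + 3] != '.'):
--                 return True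
--     return False
-- ===== Notes on version B (the rewrite author's own statement) =====
-- stated objective: alternative
-- what changed: Replaced the two boundary-finding while loops (expand left/right from period_pos, then compare run length) by three fixed-size window tests: for offset 0,1,2 check that the 3-dot window starting at period_pos-offset fits in the text, is all dots, and has non-dot or absent flanks.
-- intended difference: For negative in-range period_pos, A mixes wrapped and unwrapped indexing (text[period_pos] wraps but the loops keep the negative index) and can return True, e.g. ('..a.', -1) where the last dot is a run of one; B treats positions uniformly and returns False for any negative position, which is the intended reading of a position in the string. — e.g. on _is_three_dot_ellipsis("..a.", -1): A returns true, B returns false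
import Mathlib
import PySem

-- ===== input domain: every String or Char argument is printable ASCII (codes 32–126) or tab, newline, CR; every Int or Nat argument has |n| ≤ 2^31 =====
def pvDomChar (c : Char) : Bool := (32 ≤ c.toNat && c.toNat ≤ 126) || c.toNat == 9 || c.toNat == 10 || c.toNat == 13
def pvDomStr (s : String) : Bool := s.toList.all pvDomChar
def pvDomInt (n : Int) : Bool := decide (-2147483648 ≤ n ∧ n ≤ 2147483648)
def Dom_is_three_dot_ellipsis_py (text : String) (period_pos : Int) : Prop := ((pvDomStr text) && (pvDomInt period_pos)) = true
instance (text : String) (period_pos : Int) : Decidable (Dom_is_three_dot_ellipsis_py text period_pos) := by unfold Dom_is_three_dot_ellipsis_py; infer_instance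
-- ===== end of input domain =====

-- B replaces A's two boundary-finding while loops by three fixed-size window tests (alternative
-- decomposition, same cost); return-value equivalence is proved outside D_ (negative positions).

-- ===== PORT A =====
-- 'while start > 0 and text[start-1] == ".": start -= 1'; the loop runs at most start.toNat
-- times (start decreases, stops at 0), so that fuel makes the recursion structural and exact.
def aStartGo (l : List Char) : Nat → Int → Int
  | 0, s => s
  | f + 1, s =>
    if 0 < s ∧ PySem.List.pyGet? l (s - 1) = some '.' then aStartGo l f (s - 1) else s

-- 'while end < len(text) and text[end] == ".": end += 1'; runs at most (len - end).toNat times.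
def aEndGo (l : List Char) : Nat → Int → Int
  | 0, e => e
  | f + 1, e =>
    if e < (l.length : Int) ∧ PySem.List.pyGet? l e = some '.' then aEndGo l f (e + 1) else e

def is_three_dot_ellipsis_py (text : String) (period_pos : Int) : Bool :=
  -- text[period_pos]: pyGet? ; none = IndexError (excluded by Pre_), false returned there
  if PySem.List.pyGet? text.toList period_pos ≠ some '.' then false
  else
    decide (aEndGo text.toList ((text.toList.length : Int) - (period_pos + 1)).toNat (period_pos + 1)
            - aStartGo text.toList period_pos.toNat period_pos = 3)

-- ===== PORT B =====
-- one window test of Source B's loop body: window of three dots starting at s, with valid bounds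
-- and non-dot (or absent) flanks
def winDots (l : List Char) (s : Int) : Bool :=
  if s < 0 ∨ (l.length : Int) ≤ s + 2 then false
  else
    decide (PySem.List.pyGet? l s = some '.' ∧ PySem.List.pyGet? l (s + 1) = some '.' ∧
            PySem.List.pyGet? l (s + 2) = some '.') &&
    decide ((s - 1 < 0 ∨ ¬ PySem.List.pyGet? l (s - 1) = some '.') ∧
            ((l.length : Int) ≤ s + 3 ∨ ¬ PySem.List.pyGet? l (s + 3) = some '.'))

def is_three_dot_ellipsis_py_alt (text : String) (period_pos : Int) : Bool :=
  -- same guard as A's first line: text[period_pos] raises IndexError out of range (outside Pre_)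
  if PySem.List.pyGet? text.toList period_pos ≠ some '.' then false
  else
    winDots text.toList period_pos || winDots text.toList (period_pos - 1) ||
      winDots text.toList (period_pos - 2)

-- ===== PRECONDITION & SPEC =====
-- Pre_ excludes exactly the inputs where text[period_pos] raises IndexError in A
def Pre_is_three_dot_ellipsis_py (text : String) (period_pos : Int) : Prop :=
  -(text.toList.length : Int) ≤ period_pos ∧ period_pos < (text.toList.length : Int)
instance (text : String) (period_pos : Int) : Decidable (Pre_is_three_dot_ellipsis_py text period_pos) := by unfold Pre_is_three_dot_ellipsis_py; infer_instance
def pvWitness_is_three_dot_ellipsis_py : String × Int := ("a...b", 2)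

-- For negative in-range period_pos, A mixes wrapped indexing (text[period_pos]) with unwrapped loop
-- indices and can return True — e.g. ("..a.", -1), where the last dot is a run of one — while B
-- treats positions uniformly and returns False for any negative position, the intended reading.
def D_is_three_dot_ellipsis_py (text : String) (period_pos : Int) : Prop :=
  -- v lists the chars A reads from position period_pos on (wrapped suffix, then the string)
  let v := text.toList.drop (period_pos + (text.toList.length : Int)).toNat ++ text.toList
  period_pos < 0 ∧ -(text.toList.length : Int) ≤ period_pos ∧
  v.take 3 = ['.', '.', '.'] ∧ v[3]? ≠ some '.'
instance (text : String) (period_pos : Int) : Decidable (D_is_three_dot_ellipsis_py text period_pos) := by unfold D_is_three_dot_ellipsis_py; infer_instance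

def Spec_is_three_dot_ellipsis_py (text : String) (period_pos : Int) (out : Bool) : Prop := ¬ D_is_three_dot_ellipsis_py text period_pos → out = is_three_dot_ellipsis_py_alt text period_pos
instance (text : String) (period_pos : Int) (out : Bool) : Decidable (Spec_is_three_dot_ellipsis_py text period_pos out) := by unfold Spec_is_three_dot_ellipsis_py; infer_instance

def pvDiffWitness_is_three_dot_ellipsis_py : String × Int := ("..a.", -1)
def pvDiffWitnessOut_is_three_dot_ellipsis_py : Bool × Bool := (true, false)

-- ===== CLAIM (what is proved, stated in full; the proofs are below) =====
def Claim_unchanged_is_three_dot_ellipsis_py : Prop := ∀ (text : String) (period_pos : Int), Dom_is_three_dot_ellipsis_py text period_pos → Pre_is_three_dot_ellipsis_py text period_pos → Spec_is_three_dot_ellipsis_py text period_pos (is_three_dot_ellipsis_py text period_pos)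
def Claim_changed_is_three_dot_ellipsis_py : Prop := Dom_is_three_dot_ellipsis_py (pvDiffWitness_is_three_dot_ellipsis_py.1) (pvDiffWitness_is_three_dot_ellipsis_py.2) ∧ Pre_is_three_dot_ellipsis_py (pvDiffWitness_is_three_dot_ellipsis_py.1) (pvDiffWitness_is_three_dot_ellipsis_py.2) ∧ D_is_three_dot_ellipsis_py (pvDiffWitness_is_three_dot_ellipsis_py.1) (pvDiffWitness_is_three_dot_ellipsis_py.2) ∧ is_three_dot_ellipsis_py (pvDiffWitness_is_three_dot_ellipsis_py.1) (pvDiffWitness_is_three_dot_ellipsis_py.2) = pvDiffWitnessOut_is_three_dot_ellipsis_py.1 ∧ is_three_dot_ellipsis_py_alt (pvDiffWitness_is_three_dot_ellipsis_py.1) (pvDiffWitness_is_three_dot_ellipsis_py.2) = pvDiffWitnessOut_is_three_dot_ellipsis_py.2 ∧ pvDiffWitnessOut_is_three_dot_ellipsis_py.1 ≠ pvDiffWitnessOut_is_three_dot_ellipsis_py.2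
def Claim_exact_is_three_dot_ellipsis_py : Prop := ∀ (text : String) (period_pos : Int), Dom_is_three_dot_ellipsis_py text period_pos → Pre_is_three_dot_ellipsis_py text period_pos → D_is_three_dot_ellipsis_py text period_pos → is_three_dot_ellipsis_py text period_pos ≠ is_three_dot_ellipsis_py_alt text period_pos

-- ===== LEMMAS AND PROOFS =====

lemma vget (cs : List Char) (p : Int) (h1 : -(cs.length : Int) ≤ p) (h2 : p < 0) (i : Nat) :
    (cs.drop (p + (cs.length : Int)).toNat ++ cs)[i]? =
      if (p + i : Int) < (cs.length : Int) then PySem.List.pyGet? cs (p + i) else none := by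
  have hd : (cs.drop (p + (cs.length : Int)).toNat).length
      = cs.length - (p + (cs.length : Int)).toNat := List.length_drop
  rcases lt_or_ge i (cs.drop (p + (cs.length : Int)).toNat).length with h | h
  · rw [List.getElem?_append_left h, List.getElem?_drop, if_pos (by omega)]
    unfold PySem.List.pyGet? PySem.List.pyIdx?
    rw [if_neg (by omega), if_pos (by omega)]
    simp only [Option.bind]
    congr 1
    omega
  · rw [List.getElem?_append_right h]
    by_cases hc : (p + i : Int) < (cs.length : Int)
    · rw [if_pos hc]
      unfold PySem.List.pyGet? PySem.List.pyIdx?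
      rw [if_pos (by omega), if_pos (by omega)]
      simp only [Option.bind]
      congr 1
      omega
    · rw [if_neg hc, List.getElem?_eq_none]
      omega

lemma take3_iff (v : List Char) (a b c : Char) :
    v.take 3 = [a, b, c] ↔ (v[0]? = some a ∧ v[1]? = some b ∧ v[2]? = some c) := by
  rcases v with _ | ⟨x, _ | ⟨y, _ | ⟨z, rest⟩⟩⟩ <;> simp [List.take]

lemma D_iff (text : String) (p : Int) :
    D_is_three_dot_ellipsis_py text p ↔
      (p < 0 ∧ -(text.toList.length : Int) ≤ p ∧
       PySem.List.pyGet? text.toList p = some '.' ∧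
       (p + 1 < (text.toList.length : Int) ∧ PySem.List.pyGet? text.toList (p + 1) = some '.') ∧
       (p + 2 < (text.toList.length : Int) ∧ PySem.List.pyGet? text.toList (p + 2) = some '.') ∧
       ¬ (p + 3 < (text.toList.length : Int) ∧ PySem.List.pyGet? text.toList (p + 3) = some '.')) := by
  unfold D_is_three_dot_ellipsis_py
  simp only [take3_iff]
  have hlen : (text.toList.length : Int) = (text.length : Int) := by simp
  constructor
  · rintro ⟨h1, h2, ⟨d0, d1, d2⟩, d3⟩
    rw [vget _ _ h2 h1 0] at d0
    rw [vget _ _ h2 h1 1] at d1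
    rw [vget _ _ h2 h1 2] at d2
    rw [vget _ _ h2 h1 3] at d3
    norm_num at d0 d1 d2 d3
    refine ⟨h1, h2, d0.2, ⟨by omega, d1.2⟩, ⟨by omega, d2.2⟩, ?_⟩
    rintro ⟨hb, hd⟩
    exact d3 (by omega) hd
  · rintro ⟨h1, h2, d0, ⟨b1, d1⟩, ⟨b2, d2⟩, d3⟩
    refine ⟨h1, h2, ⟨?_, ?_, ?_⟩, ?_⟩
    · rw [vget _ _ h2 h1 0]; norm_num; exact ⟨by omega, d0⟩
    · rw [vget _ _ h2 h1 1]; norm_num; exact ⟨by omega, d1⟩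
    · rw [vget _ _ h2 h1 2]; norm_num; exact ⟨by omega, d2⟩
    · rw [vget _ _ h2 h1 3]
      norm_num
      intro hb hd
      exact d3 ⟨by omega, hd⟩

lemma aStartGo_spec (l : List Char) (f : Nat) (s : Int) (hf : s ≤ (f : Int)) :
    aStartGo l f s ≤ s ∧ (0 ≤ s → 0 ≤ aStartGo l f s) ∧
    (∀ k, aStartGo l f s ≤ k → k < s → PySem.List.pyGet? l k = some '.') ∧
    ¬ (0 < aStartGo l f s ∧ PySem.List.pyGet? l (aStartGo l f s - 1) = some '.') := by
  induction f generalizing s with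
  | zero =>
    simp only [aStartGo]
    refine ⟨le_refl _, fun h => h, fun k hk1 hk2 => absurd (lt_of_le_of_lt hk1 hk2) (lt_irrefl _), ?_⟩
    rintro ⟨h1, _⟩; omega
  | succ f ih =>
    simp only [aStartGo]
    split_ifs with h
    · obtain ⟨h1, h2, h3, h4⟩ := ih (s - 1) (by omega)
      refine ⟨by omega, fun _ => h2 (by omega), ?_, h4⟩
      intro k hk1 hk2
      rcases lt_or_ge k (s - 1) with hk | hk
      · exact h3 k hk1 hk
      · have : k = s - 1 := by omega
        rw [this]; exact h.2
    · exact ⟨le_refl _, fun h => h, fun k hk1 hk2 => absurd (lt_of_le_of_lt hk1 hk2) (lt_irrefl _), h⟩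

lemma aStartGo_eq (l : List Char) (f : Nat) (s t : Int) (hts : t ≤ s) (h0 : 0 ≤ t)
    (hf : s - t ≤ (f : Int))
    (hd : ∀ k, t ≤ k → k < s → PySem.List.pyGet? l k = some '.')
    (hstop : ¬ (0 < t ∧ PySem.List.pyGet? l (t - 1) = some '.')) :
    aStartGo l f s = t := by
  induction f generalizing s with
  | zero =>
    have : s = t := by omega
    simp [aStartGo, this]
  | succ f ih =>
    simp only [aStartGo]
    rcases eq_or_lt_of_le hts with h | h
    · rw [← h, if_neg hstop]
    · rw [if_pos ⟨by omega, hd (s - 1) (by omega) (by omega)⟩]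
      exact ih (s - 1) (by omega) (by omega) (fun k hk1 hk2 => hd k hk1 (by omega))

lemma aEndGo_spec (l : List Char) (f : Nat) (e : Int) (hf : (l.length : Int) - e ≤ (f : Int)) :
    e ≤ aEndGo l f e ∧ (e ≤ (l.length : Int) → aEndGo l f e ≤ (l.length : Int)) ∧
    (∀ k, e ≤ k → k < aEndGo l f e → k < (l.length : Int) ∧ PySem.List.pyGet? l k = some '.') ∧
    ¬ (aEndGo l f e < (l.length : Int) ∧ PySem.List.pyGet? l (aEndGo l f e) = some '.') := by
  induction f generalizing e with
  | zero =>
    simp only [aEndGo]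
    refine ⟨le_refl _, fun h => h, fun k hk1 hk2 => absurd (lt_of_le_of_lt hk1 hk2) (lt_irrefl _), ?_⟩
    rintro ⟨h1, _⟩; omega
  | succ f ih =>
    simp only [aEndGo]
    split_ifs with h
    · obtain ⟨h1, h2, h3, h4⟩ := ih (e + 1) (by omega)
      refine ⟨by omega, fun _ => h2 (by omega), ?_, h4⟩
      intro k hk1 hk2
      rcases lt_or_ge k (e + 1) with hk | hk
      · have : k = e := by omega
        rw [this]; exact h
      · exact h3 k hk hk2
    · exact ⟨le_refl _, fun h => h, fun k hk1 hk2 => absurd (lt_of_le_of_lt hk1 hk2) (lt_irrefl _), h⟩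

lemma aEndGo_eq (l : List Char) (f : Nat) (e t : Int) (het : e ≤ t) (hf : t - e ≤ (f : Int))
    (hd : ∀ k, e ≤ k → k < t → k < (l.length : Int) ∧ PySem.List.pyGet? l k = some '.')
    (hstop : ¬ (t < (l.length : Int) ∧ PySem.List.pyGet? l t = some '.')) :
    aEndGo l f e = t := by
  induction f generalizing e with
  | zero =>
    have : e = t := by omega
    simp [aEndGo, this]
  | succ f ih =>
    simp only [aEndGo]
    rcases eq_or_lt_of_le het with h | h
    · rw [h, if_neg hstop]
    · rw [if_pos ⟨(hd e (le_refl _) h).1, (hd e (le_refl _) h).2⟩]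
      exact ih (e + 1) (by omega) (by omega) (fun k hk1 hk2 => hd k (by omega) hk2)

lemma winDots_iff (l : List Char) (s : Int) :
    winDots l s = true ↔
      0 ≤ s ∧ s + 2 < (l.length : Int) ∧
      PySem.List.pyGet? l s = some '.' ∧ PySem.List.pyGet? l (s + 1) = some '.' ∧
      PySem.List.pyGet? l (s + 2) = some '.' ∧
      (s - 1 < 0 ∨ ¬ PySem.List.pyGet? l (s - 1) = some '.') ∧
      ((l.length : Int) ≤ s + 3 ∨ ¬ PySem.List.pyGet? l (s + 3) = some '.') := by
  unfold winDots
  split_ifs with h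
  · simp only [false_iff]
    rintro ⟨h1, h2, _⟩; omega
  · simp only [Bool.and_eq_true, decide_eq_true_eq]
    constructor
    · rintro ⟨⟨d1, d2, d3⟩, f1, f2⟩
      exact ⟨by omega, by omega, d1, d2, d3, f1, f2⟩
    · rintro ⟨_, _, d1, d2, d3, f1, f2⟩
      exact ⟨⟨d1, d2, d3⟩, f1, f2⟩

lemma winDots_neg (l : List Char) (s : Int) (h : s < 0) : winDots l s = false := by
  unfold winDots
  rw [if_pos (Or.inl h)]

-- the main case 0 ≤ period_pos < len, text[period_pos] = '.'
lemma main_pos (l : List Char) (p : Int) (hp0 : 0 ≤ p) (hpn : p < (l.length : Int))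
    (hdot : PySem.List.pyGet? l p = some '.') :
    (decide (aEndGo l ((l.length : Int) - (p + 1)).toNat (p + 1) - aStartGo l p.toNat p = 3) : Bool)
      = (winDots l p || winDots l (p - 1) || winDots l (p - 2)) := by
  obtain ⟨s1, s2, s3, s4⟩ := aStartGo_spec l p.toNat p (by omega)
  obtain ⟨e1, e2, e3, e4⟩ := aEndGo_spec l ((l.length : Int) - (p + 1)).toNat (p + 1) (by omega)
  set r := aStartGo l p.toNat p with hr
  set e := aEndGo l ((l.length : Int) - (p + 1)).toNat (p + 1) with he
  rw [Bool.eq_iff_iff]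
  simp only [decide_eq_true_eq, Bool.or_eq_true]
  constructor
  · intro h3
    have hr0 : 0 ≤ r := s2 hp0
    have hen : e ≤ (l.length : Int) := e2 (by omega)
    have hwin : winDots l r = true := by
      rw [winDots_iff]
      refine ⟨hr0, by omega, ?_, ?_, ?_, ?_, ?_⟩
      · rcases lt_trichotomy r p with h | h | h
        · exact s3 r (le_refl _) h
        · rw [h]; exact hdot
        · omega
      · rcases lt_trichotomy (r + 1) p with h | h | h
        · exact s3 _ (by omega) h
        · rw [h]; exact hdot
        · exact (e3 _ (by omega) (by omega)).2
      · rcases lt_trichotomy (r + 2) p with h | h | h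
        · exact s3 _ (by omega) h
        · rw [h]; exact hdot
        · exact (e3 _ (by omega) (by omega)).2
      · rcases not_and_or.mp s4 with h | h
        · left; omega
        · right; exact h
      · have : r + 3 = e := by omega
        rw [this]
        rcases not_and_or.mp e4 with h | h
        · left; omega
        · right; exact h
    have : r = p ∨ r = p - 1 ∨ r = p - 2 := by omega
    rcases this with h | h | h
    · exact Or.inl (Or.inl (h ▸ hwin))
    · exact Or.inl (Or.inr (by rw [show p - 1 = r by omega]; exact hwin))
    · exact Or.inr (by rw [show p - 2 = r by omega]; exact hwin)
  · intro hB
    obtain ⟨s, hsp, hps, hw⟩ : ∃ s, s ≤ p ∧ p ≤ s + 2 ∧ winDots l s = true := by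
      rcases hB with (h | h) | h
      · exact ⟨p, le_refl _, by omega, h⟩
      · exact ⟨p - 1, by omega, by omega, h⟩
      · exact ⟨p - 2, by omega, by omega, h⟩
    rw [winDots_iff] at hw
    obtain ⟨hs0, hsn, d1, d2, d3, f1, f2⟩ := hw
    have hdk : ∀ k, s ≤ k → k ≤ s + 2 → PySem.List.pyGet? l k = some '.' := by
      intro k h1 h2
      have : k = s ∨ k = s + 1 ∨ k = s + 2 := by omega
      rcases this with h | h | h <;> rw [h] <;> assumption
    have hrs : r = s := by
      apply aStartGo_eq l p.toNat p s hsp hs0 (by omega)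
      · intro k hk1 hk2; exact hdk k hk1 (by omega)
      · rintro ⟨h1, h2⟩
        rcases f1 with h | h
        · omega
        · exact h h2
    have hes : e = s + 3 := by
      apply aEndGo_eq l _ (p + 1) (s + 3) (by omega) (by omega)
      · intro k hk1 hk2
        exact ⟨by omega, hdk k (by omega) (by omega)⟩
      · rintro ⟨h1, h2⟩
        rcases f2 with h | h
        · omega
        · exact h h2
    omega

-- the negative-position case: A's loops start from the raw negative index
lemma a_neg (text : String) (p : Int) (hp : p < 0) (_hpn : -(text.toList.length : Int) ≤ p)
    (hdot : PySem.List.pyGet? text.toList p = some '.')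
    (hch : (p + 1 < (text.toList.length : Int) ∧ PySem.List.pyGet? text.toList (p + 1) = some '.') ∧
           (p + 2 < (text.toList.length : Int) ∧ PySem.List.pyGet? text.toList (p + 2) = some '.') ∧
           ¬ (p + 3 < (text.toList.length : Int) ∧ PySem.List.pyGet? text.toList (p + 3) = some '.')) :
    is_three_dot_ellipsis_py text p = true := by
  unfold is_three_dot_ellipsis_py
  rw [if_neg (by simp [hdot])]
  have hstart : aStartGo text.toList p.toNat p = p := by
    have h0 : p.toNat = 0 := by omega
    rw [h0]; rfl
  have hend : aEndGo text.toList ((text.toList.length : Int) - (p + 1)).toNat (p + 1) = p + 3 := by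
    apply aEndGo_eq text.toList _ (p + 1) (p + 3) (by omega) (by omega)
    · intro k hk1 hk2
      have : k = p + 1 ∨ k = p + 2 := by omega
      rcases this with h | h <;> rw [h]
      · exact hch.1
      · exact hch.2.1
    · exact hch.2.2
  rw [hstart, hend]
  simp

-- ===== VERDICT (by name: the statement is the Claim_ definition above) =====
theorem is_three_dot_ellipsis_py_spec : Claim_unchanged_is_three_dot_ellipsis_py := by
  intro text p _ hpre hnd
  obtain ⟨hlo, hhi⟩ := hpre
  unfold is_three_dot_ellipsis_py is_three_dot_ellipsis_py_alt
  set l := text.toList with hl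
  by_cases hdot : PySem.List.pyGet? l p = some '.'
  · rw [if_neg (by simp [hdot]), if_neg (by simp [hdot])]
    rcases lt_or_ge p 0 with hp | hp
    · -- negative position: B is false; A != 3 since ¬D
      rw [winDots_neg l p hp, winDots_neg l (p - 1) (by omega), winDots_neg l (p - 2) (by omega)]
      simp only [Bool.or_false]
      have hstart : aStartGo l p.toNat p = p := by
        have h0 : p.toNat = 0 := by omega
        rw [h0]; rfl
      rw [hstart]
      obtain ⟨e1, e2, e3, e4⟩ := aEndGo_spec l ((l.length : Int) - (p + 1)).toNat (p + 1) (by omega)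
      set e := aEndGo l ((l.length : Int) - (p + 1)).toNat (p + 1) with he
      simp only [decide_eq_false_iff_not]
      intro habs
      apply hnd
      rw [D_iff]
      rw [← hl]
      have hept : e = p + 3 := by omega
      refine ⟨hp, hlo, hdot, ⟨?_, ?_⟩, ⟨?_, ?_⟩, ?_⟩
      · exact (e3 (p + 1) (le_refl _) (by omega)).1
      · exact (e3 (p + 1) (le_refl _) (by omega)).2
      · exact (e3 (p + 2) (by omega) (by omega)).1
      · exact (e3 (p + 2) (by omega) (by omega)).2
      · rw [← hept]; exact e4
    · exact main_pos l p hp hhi hdot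
  · rw [if_pos (by simp [hdot]), if_pos (by simp [hdot])]

theorem is_three_dot_ellipsis_py_changed : Claim_changed_is_three_dot_ellipsis_py := by
  unfold Claim_changed_is_three_dot_ellipsis_py; decide

theorem is_three_dot_ellipsis_py_tight : Claim_exact_is_three_dot_ellipsis_py := by
  intro text p _ _ hD
  rw [D_iff] at hD
  obtain ⟨hp, hlo, hdot, c1, c2, c3⟩ := hD
  have hA : is_three_dot_ellipsis_py text p = true := a_neg text p hp hlo hdot ⟨c1, c2, c3⟩
  have hB : is_three_dot_ellipsis_py_alt text p = false := by
    unfold is_three_dot_ellipsis_py_alt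
    rw [if_neg (by simp [hdot]),
        winDots_neg _ p hp, winDots_neg _ (p - 1) (by omega), winDots_neg _ (p - 2) (by omega)]
    rfl
  rw [hA, hB]
  decide
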